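-- pv_equiv track=rewrite | github.com/ArmaanK02/rutgers-scheduler-v1.3.0 | prerequisite_parser.py | filter_completed_courses
-- ===== SOURCE A (Python) =====
-- from typing import List, Dict, Callable
--
-- def filter_completed_courses(target_courses: List[str], history: List[Dict]) -> List[str]:
--     completed_codes = set()
--     for c in history:
--         completed_codes.add(c.get('short_code'))
--         completed_codes.add(c.get('code'))
--
--     needed = []
--     for target in target_courses:
--         parts = target.split(':')
--         if len(parts) == 3:
--             short_target = f"{parts[1]}:{parts[2]}"
--         else:
--             short_target = target
--
--         if short_target not in completed_codes:
--             needed.append(target)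
--
--     return needed
-- ===== SOURCE B (Python) =====
-- from typing import List, Dict
--
-- def filter_completed_courses(target_courses: List[str], history: List[Dict]) -> List[str]:
--     # Pair each target with its short code once, then loop over HISTORY,
--     # repeatedly filtering out the targets a record completes.
--     def short(t):
--         p = t.split(':')
--         return f"{p[1]}:{p[2]}" if len(p) == 3 else t
--
--     remaining = [(t, short(t)) for t in target_courses]
--     for c in history:
--         codes = (c.get('short_code'), c.get('code'))
--         remaining = [(t, s) for (t, s) in remaining if s not in codes]
--     return [t for (t, _) in remaining]
-- ===== Notes on version B (the rewrite author's own statement) =====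
-- stated objective: alternative
-- what changed: B inverts the traversal: instead of building a set of completed codes and looping over targets, it pairs each target with its short code once and then loops over history, filtering the surviving target list record by record.
import Mathlib
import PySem

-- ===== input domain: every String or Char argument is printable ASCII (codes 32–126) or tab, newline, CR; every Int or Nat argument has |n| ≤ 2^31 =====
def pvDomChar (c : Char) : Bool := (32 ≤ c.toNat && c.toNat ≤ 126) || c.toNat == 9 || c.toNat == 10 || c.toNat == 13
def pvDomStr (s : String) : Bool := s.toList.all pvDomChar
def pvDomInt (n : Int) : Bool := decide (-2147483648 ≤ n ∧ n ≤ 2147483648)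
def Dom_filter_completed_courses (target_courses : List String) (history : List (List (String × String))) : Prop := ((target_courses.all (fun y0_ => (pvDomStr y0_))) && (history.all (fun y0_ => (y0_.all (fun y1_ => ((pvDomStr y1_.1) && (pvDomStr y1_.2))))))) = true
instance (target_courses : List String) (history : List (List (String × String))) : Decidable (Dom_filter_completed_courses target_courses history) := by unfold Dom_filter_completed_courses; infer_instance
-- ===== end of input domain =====

-- B inverts the traversal: it pairs each target with its short code once, then loops over
-- HISTORY, filtering the surviving target list record by record (objective: alternative).

-- ===== PORT A =====
def filter_completed_courses (target_courses : List String) (history : List (List (String × String))) : List String :=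
  let completed_codes : PySem.Set (Option String) :=
    history.foldl (fun s c =>
      PySem.Set.add (PySem.Set.add s (PySem.Dict.get? (PySem.Dict.mk c) "short_code")) (PySem.Dict.get? (PySem.Dict.mk c) "code"))
      PySem.Set.empty
  target_courses.foldl (fun needed target =>
    let parts := (PySem.Str.split? target ":").getD []
    let short_target :=
      if parts.length = 3 then
        PySem.Str.join ":" [PySem.List.pyGetD parts 1 "", PySem.List.pyGetD parts 2 ""]
      else target
    if PySem.Set.contains completed_codes (some short_target) then needed
    else needed ++ [target]) []

-- ===== PORT B =====
-- B's helper short(t)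
def pvShortB (t : String) : String :=
  let p := (PySem.Str.split? t ":").getD []
  if p.length = 3 then
    PySem.Str.join ":" [PySem.List.pyGetD p 1 "", PySem.List.pyGetD p 2 ""]
  else t

def filter_completed_courses_alt (target_courses : List String) (history : List (List (String × String))) : List String :=
  let remaining := target_courses.map (fun t => (t, pvShortB t))
  let remaining := history.foldl (fun rem c =>
    let codes := (PySem.Dict.get? (PySem.Dict.mk c) "short_code", PySem.Dict.get? (PySem.Dict.mk c) "code")
    rem.filter (fun ts => !(some ts.2 == codes.1 || some ts.2 == codes.2))) remaining
  remaining.map (fun ts => ts.1)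

-- ===== PRECONDITION & SPEC =====
def Spec_filter_completed_courses (target_courses : List String) (history : List (List (String × String))) (out : List String) : Prop := out = filter_completed_courses_alt target_courses history
instance (target_courses : List String) (history : List (List (String × String))) (out : List String) : Decidable (Spec_filter_completed_courses target_courses history out) := by unfold Spec_filter_completed_courses; infer_instance

-- ===== CLAIM =====
def Claim_equal_filter_completed_courses : Prop := ∀ (target_courses : List String) (history : List (List (String × String))), Dom_filter_completed_courses target_courses history → Spec_filter_completed_courses target_courses history (filter_completed_courses target_courses history)

-- ===== LEMMAS AND PROOFS =====

-- record c completes short code x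
def pvMatch (c : List (String × String)) (x : String) : Bool :=
  some x == PySem.Dict.get? (PySem.Dict.mk c) "short_code" ||
  some x == PySem.Dict.get? (PySem.Dict.mk c) "code"

-- membership in A's folded-up set = some record matches
lemma mem_completed_fold (history : List (List (String × String)))
    (s : PySem.Set (Option String)) (x : String) :
    (some x ∈ history.foldl (fun s c =>
        PySem.Set.add (PySem.Set.add s (PySem.Dict.get? (PySem.Dict.mk c) "short_code")) (PySem.Dict.get? (PySem.Dict.mk c) "code")) s)
    ↔ some x ∈ s ∨ history.any (fun c => pvMatch c x) = true := by
  induction history generalizing s with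
  | nil => simp
  | cons c cs ih =>
    simp only [List.foldl_cons, ih, PySem.Set.mem_add, List.any_cons, Bool.or_eq_true,
      pvMatch, beq_iff_eq]
    tauto

lemma cond_eq (history : List (List (String × String))) (x : String) :
    PySem.Set.contains
      (history.foldl (fun s c =>
        PySem.Set.add (PySem.Set.add s (PySem.Dict.get? (PySem.Dict.mk c) "short_code")) (PySem.Dict.get? (PySem.Dict.mk c) "code"))
        PySem.Set.empty) (some x)
    = history.any (fun c => pvMatch c x) := by
  rw [Bool.eq_iff_iff, PySem.Set.contains_iff, mem_completed_fold]
  simp [PySem.Set.empty]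

-- a fold that skips matched elements is a filter
lemma foldl_if_skip {α : Type} (p : α → Bool) (l : List α) (acc : List α) :
    l.foldl (fun needed target => if p target = true then needed else needed ++ [target]) acc
    = acc ++ l.filter (fun t => !p t) := by
  induction l generalizing acc with
  | nil => simp
  | cons t ts ih =>
    simp only [List.foldl_cons, List.filter_cons]
    by_cases h : p t = true <;> simp [h, ih]

-- B's history loop of filters = one filter over the conjoined condition
lemma b_history_filter (history : List (List (String × String)))
    (rem : List (String × String)) :
    history.foldl (fun rem c =>
      rem.filter (fun ts =>
        !(some ts.2 == PySem.Dict.get? (PySem.Dict.mk c) "short_code" ||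
          some ts.2 == PySem.Dict.get? (PySem.Dict.mk c) "code"))) rem
    = rem.filter (fun ts => !(history.any (fun c => pvMatch c ts.2))) := by
  induction history generalizing rem with
  | nil => simp
  | cons c cs ih =>
    simp only [List.foldl_cons, ih, List.filter_filter]
    apply List.filter_congr
    intro ts _
    simp [pvMatch, Bool.not_or, Bool.and_comm]

-- filtering a mapped pair list, then projecting, = filtering the originals
lemma map_pair_filter (P : String → Bool) (ts : List String) :
    ((ts.map (fun t => (t, pvShortB t))).filter (fun p => P p.2)).map (fun p => p.1)
    = ts.filter (fun t => P (pvShortB t)) := by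
  induction ts with
  | nil => rfl
  | cons t ts ih =>
    simp only [List.map_cons, List.filter_cons]
    by_cases h : P (pvShortB t) = true <;> simp [h, ih]

-- ===== VERDICT =====
theorem filter_completed_courses_spec : Claim_equal_filter_completed_courses := by
  intro target_courses history _
  unfold Spec_filter_completed_courses filter_completed_courses filter_completed_courses_alt
  simp only
  rw [foldl_if_skip, b_history_filter,
    map_pair_filter (fun x => !(history.any (fun c => pvMatch c x)))]
  apply List.filter_congr
  intro t _
  simp only [pvShortB]
  rw [cond_eq]
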